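-- pv_equiv track=rewrite | github.com/Daki404/PS | 백준/Gold/21611. 마법사 상어와 블리자드/마법사 상어와 블리자드.py | explode_bead
-- ===== SOURCE A (Python) =====
-- from typing import List
--
-- def explode_bead(bead_stack: List[int]) -> List[int]:
--     if len(bead_stack) == 1:
--         return [0], 0
--
--     score = 0
--     flag = True
--
--     while flag\
--             and len(bead_stack) >= 2:
--         flag = False
--         num = bead_stack[1]
--         cnt = 0
--         new_bead = [0]
--         for bead in bead_stack[1:] + [-1]:
--             if num == bead:
--                 cnt += 1
--             else:
--                 if cnt >= 4:
--                     score += num * cnt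
--                     del new_bead[-cnt:]
--                     flag = True
--                 num = bead
--                 cnt = 1
--             new_bead.append(bead)
--         bead_stack = new_bead[:-1]
--
--     return bead_stack, score
-- ===== SOURCE B (Python) =====
-- def explode_bead(bead_stack):
--     if not bead_stack:
--         return bead_stack, 0
--     # run-length encode the tail once
--     groups = []
--     for b in bead_stack[1:]:
--         if groups and groups[-1][0] == b:
--             groups[-1][1] += 1
--         else:
--             groups.append([b, 1])
--     score = 0
--     changed = True
--     while changed:
--         changed = False
--         merged = []
--         for v, c in groups:
--             if c >= 4:
--                 score += v * c
--                 changed = True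
--             elif merged and merged[-1][0] == v:
--                 merged[-1][1] += c
--             else:
--                 merged.append([v, c])
--         groups = merged
--     out = [0]
--     for v, c in groups:
--         out.extend([v] * c)
--     return out, score
-- ===== Notes on version B (the rewrite author's own statement) =====
-- stated objective: alternative
-- what changed: B run-length-encodes the tail once into (value,count) groups and each cascade pass filters/merges that group list, instead of A's per-pass bead-by-bead rescan of the whole list with a -1 sentinel and in-place run deletion; per-pass work drops from the bead count to the group count, at the cost of the one-time encoding.
-- outside the precondition, e.g. on explode_bead([0, -1, -1, -1, -1]): A returns ([0, -1, -1, -1, -1], 0), B returns ([0], -4)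
import Mathlib
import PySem

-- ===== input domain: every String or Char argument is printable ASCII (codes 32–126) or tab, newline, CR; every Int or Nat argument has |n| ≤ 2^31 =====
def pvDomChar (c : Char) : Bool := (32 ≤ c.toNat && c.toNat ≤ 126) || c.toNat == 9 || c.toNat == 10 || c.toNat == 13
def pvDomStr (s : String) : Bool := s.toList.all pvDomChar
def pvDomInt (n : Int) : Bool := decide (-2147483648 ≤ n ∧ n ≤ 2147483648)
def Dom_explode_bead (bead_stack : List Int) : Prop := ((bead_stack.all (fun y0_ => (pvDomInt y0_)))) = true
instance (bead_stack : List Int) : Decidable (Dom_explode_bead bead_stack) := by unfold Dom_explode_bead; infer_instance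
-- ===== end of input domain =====

-- B replaces A's per-pass bead-by-bead rescan (with a -1 end sentinel) by a one-time
-- run-length encoding of the tail and cascade passes over (value,count) groups.


-- ===== PORT A =====
-- loop state of A's inner for-loop: (num, cnt, new_bead, score, flag)
structure StA where
  num : Int
  cnt : Int
  nb  : List Int
  sc  : Int
  fl  : Bool
  deriving Repr, DecidableEq

def stepA (st : StA) (bead : Int) : StA :=
  if st.num == bead then
    { st with cnt := st.cnt + 1, nb := st.nb ++ [bead] }
  else
    if st.cnt ≥ 4 then
      -- 'del new_bead[-cnt:]' with cnt ≥ 4 > 0 drops the last cnt elements (clamped at 0): take (len − cnt)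
      { num := bead, cnt := 1, nb := (st.nb.take (st.nb.length - st.cnt.toNat)) ++ [bead],
        sc := st.sc + st.num * st.cnt, fl := true }
    else
      { st with num := bead, cnt := 1, nb := st.nb ++ [bead] }

-- one pass of A's while-body: fold over bead_stack[1:] + [-1]
-- (bead_stack[1] is in range under the caller's guard len ≥ 2, so pyGetD's default is never used)
def passA (stack : List Int) (sc : Int) : StA :=
  (stack.tail ++ [-1]).foldl stepA ⟨PySem.List.pyGetD stack 1 0, 0, [0], sc, false⟩

-- termination invariant for A's while loop: a flagged pass shrank the list
def invA (st : StA) (k : Nat) : Prop :=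
  st.cnt.toNat ≤ k ∧ st.nb.length ≤ k + 1 ∧ (st.fl = true → st.nb.length + 4 ≤ k + 1)

lemma invA_step (st : StA) (k : Nat) (b : Int) (h : invA st k) : invA (stepA st b) (k + 1) := by
  obtain ⟨h1, h2, h3⟩ := h
  by_cases hfl : st.fl = true
  · have h4 := h3 hfl
    unfold invA stepA
    split
    · exact ⟨by simp only []; omega, by simp <;> omega, by intro _; simp; omega⟩
    · split
      · exact ⟨by simp <;> omega, by simp <;> omega, by intro _; simp; omega⟩
      · exact ⟨by simp <;> omega, by simp <;> omega, by intro _; simp [hfl]; omega⟩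
  · unfold invA stepA
    split
    · exact ⟨by simp only []; omega, by simp <;> omega, by intro hf; exact absurd hf hfl⟩
    · split
      · exact ⟨by simp <;> omega, by simp <;> omega, by intro _; simp; omega⟩
      · exact ⟨by simp <;> omega, by simp <;> omega, by intro hf; exact absurd hf hfl⟩

lemma invA_foldl (l : List Int) : ∀ (st : StA) (k : Nat), invA st k → invA (l.foldl stepA st) (k + l.length) := by
  induction l with
  | nil => intro st k h; simpa using h
  | cons b t ih =>
    intro st k h
    have := ih (stepA st b) (k + 1) (invA_step st k b h)
    simpa [Nat.add_comm, Nat.add_assoc, Nat.add_left_comm] using this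

lemma passA_fl_len (stack : List Int) (sc : Int) (h2 : 2 ≤ stack.length)
    (hf : (passA stack sc).fl = true) : (passA stack sc).nb.length + 4 ≤ stack.length + 1 := by
  have h0 : invA ⟨PySem.List.pyGetD stack 1 0, 0, [0], sc, false⟩ 0 := by
    unfold invA; simp
  have h := invA_foldl (stack.tail ++ [-1]) _ 0 h0
  have hlen : 0 + (stack.tail ++ [-1]).length = stack.length := by
    simp [List.length_tail]; omega
  rw [hlen] at h
  exact h.2.2 hf

def loopA (stack : List Int) (sc : Int) : List Int × Int :=
  if h : 2 ≤ stack.length then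
    let st := passA stack sc
    if hf : st.fl then loopA st.nb.dropLast st.sc else (st.nb.dropLast, st.sc)
  else (stack, sc)
termination_by stack.length
decreasing_by
  have := passA_fl_len stack sc h hf
  simp only [List.length_dropLast]
  omega

def explode_bead (bead_stack : List Int) : List Int × Int :=
  if bead_stack.length == 1 then ([0], 0) else loopA bead_stack 0

-- ===== PORT B =====
-- run-length encoding step: 'if groups and groups[-1][0] == b: groups[-1][1] += 1 else: groups.append([b,1])'
def stepR (g : List (Int × Int)) (b : Int) : List (Int × Int) :=
  match g.getLast? with
  | some (v, c) => if v == b then g.dropLast ++ [(v, c + 1)] else g ++ [(b, 1)]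
  | none => [(b, 1)]

-- state of B's pass over the group list: (merged, score, changed)
structure StB where
  m  : List (Int × Int)
  sc : Int
  ch : Bool
  deriving Repr, DecidableEq

def stepM (st : StB) (p : Int × Int) : StB :=
  if p.2 ≥ 4 then { st with sc := st.sc + p.1 * p.2, ch := true }
  else
    match st.m.getLast? with
    | some (w, d) =>
        if w == p.1 then { st with m := st.m.dropLast ++ [(w, d + p.2)] }
        else { st with m := st.m ++ [p] }
    | none => { st with m := [p] }

def passB (gs : List (Int × Int)) (sc : Int) : StB := gs.foldl stepM ⟨[], sc, false⟩

-- termination measure for B's while loop: total bead count of the groups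
def mB (gs : List (Int × Int)) : Nat := (gs.map (fun p => p.2.toNat)).sum

def pen (b : Bool) : Nat := if b then 4 else 0

lemma mB_concat (m : List (Int × Int)) (w d : Int) : mB (m ++ [(w, d)]) = mB m + d.toNat := by
  simp [mB]

lemma mB_step (st : StB) (p : Int × Int) :
    mB (stepM st p).m + pen (stepM st p).ch ≤ mB st.m + p.2.toNat + pen st.ch := by
  unfold stepM
  split
  · simp only [pen]
    split <;> split <;> omega
  · rcases List.eq_nil_or_concat st.m with hm | ⟨m', ⟨w, d⟩, hm⟩ <;> rw [hm]
    · simp only [List.getLast?_nil]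
      simp only [mB, List.map_nil, List.sum_nil, List.map_cons, List.sum_cons]
      omega
    · simp only [List.concat_eq_append] at hm ⊢
      simp only [List.getLast?_concat]
      split
      · simp only [List.dropLast_concat, mB_concat]
        have : (d + p.2).toNat ≤ d.toNat + p.2.toNat := by omega
        omega
      · have h5 : mB ((m' ++ [(w, d)]) ++ [p]) = mB (m' ++ [(w, d)]) + p.2.toNat := by
          rw [mB_concat (m' ++ [(w, d)]) p.1 p.2]
        simp only [h5, mB_concat]
        omega

lemma mB_foldl (gs : List (Int × Int)) : ∀ (st : StB),
    mB (gs.foldl stepM st).m + pen (gs.foldl stepM st).ch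
      ≤ mB st.m + mB gs + pen st.ch := by
  induction gs with
  | nil => intro st; simp [mB]
  | cons p t ih =>
    intro st
    have h1 := ih (stepM st p)
    have h2 := mB_step st p
    simp only [List.foldl_cons]
    have h3 : mB (p :: t) = p.2.toNat + mB t := by simp [mB]
    omega

lemma passB_ch_dec (gs : List (Int × Int)) (sc : Int) (hc : (passB gs sc).ch = true) :
    mB (passB gs sc).m < mB gs := by
  have h := mB_foldl gs ⟨[], sc, false⟩
  simp only [passB] at hc ⊢
  rw [hc] at h
  have h0 : mB (⟨[], sc, false⟩ : StB).m = 0 := rfl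
  have h1 : pen (⟨[], sc, false⟩ : StB).ch = 0 := rfl
  have h2 : pen true = 4 := rfl
  rw [h0, h1, h2] at h
  omega

def loopB (gs : List (Int × Int)) (sc : Int) : List (Int × Int) × Int :=
  let st := passB gs sc
  if hc : st.ch then loopB st.m st.sc
  else (st.m, st.sc)
termination_by mB gs
decreasing_by exact passB_ch_dec gs sc hc

def explode_bead_alt (bead_stack : List Int) : List Int × Int :=
  match bead_stack with
  | [] => ([], 0)
  | _ :: t =>
    let gs := t.foldl stepR []
    let r := loopB gs 0
    (r.1.foldl (fun out p => out ++ List.replicate p.2.toNat p.1) [0], r.2)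

-- ===== PRECONDITION & SPEC =====
-- Pre_ restricts beads to values ≠ -1 after the head (the game's natural domain; real bead
-- values are positive): A's -1 end sentinel collides with bead value -1, so a trailing run
-- of -1 beads of length ≥ 4 is silently never exploded — an artefact of the sentinel.
def Pre_explode_bead (bead_stack : List Int) : Prop := (-1 : Int) ∉ bead_stack.tail
instance (bead_stack : List Int) : Decidable (Pre_explode_bead bead_stack) := by unfold Pre_explode_bead; infer_instance

def pvWitness_explode_bead : List Int := [0, 1, 1, 1, 1, 2, 2, 1]

def Spec_explode_bead (bead_stack : List Int) (out : List Int × Int) : Prop := out = explode_bead_alt bead_stack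
instance (bead_stack : List Int) (out : List Int × Int) : Decidable (Spec_explode_bead bead_stack out) := by unfold Spec_explode_bead; infer_instance

-- ===== CLAIM (what is proved, stated in full; the proofs are below) =====
def Claim_equal_explode_bead : Prop := ∀ (bead_stack : List Int), Dom_explode_bead bead_stack → Pre_explode_bead bead_stack → Spec_explode_bead bead_stack (explode_bead bead_stack)

-- ===== LEMMAS AND PROOFS =====

-- beads denoted by a group list
def flat (gs : List (Int × Int)) : List Int := gs.flatMap (fun p => List.replicate p.2.toNat p.1)

-- groups surviving a pass (count < 4)
def keep (gs : List (Int × Int)) : List (Int × Int) := gs.filter (fun p => decide (p.2 < 4))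

-- score gained in a pass
def scoreOf (gs : List (Int × Int)) : Int := ((gs.filter (fun p => decide (4 ≤ p.2))).map (fun p => p.1 * p.2)).sum

-- did the pass explode anything
def anyBig (gs : List (Int × Int)) : Bool := gs.any (fun p => decide (4 ≤ p.2))

def cnt1 (gs : List (Int × Int)) : Prop := ∀ p ∈ gs, 1 ≤ p.2
def noM1 (gs : List (Int × Int)) : Prop := ∀ p ∈ gs, p.1 ≠ -1
def chainD (gs : List (Int × Int)) : Prop := List.IsChain (fun a b => a.1 ≠ b.1) gs

lemma flat_cons (p : Int × Int) (gs : List (Int × Int)) :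
    flat (p :: gs) = List.replicate p.2.toNat p.1 ++ flat gs := by simp [flat]

lemma flat_nil : flat [] = [] := rfl

lemma flat_append (g h : List (Int × Int)) : flat (g ++ h) = flat g ++ flat h := by
  simp [flat]

lemma flat_ne_nil (gs : List (Int × Int)) (h1 : cnt1 gs) (h0 : gs ≠ []) : flat gs ≠ [] := by
  cases gs with
  | nil => exact absurd rfl h0
  | cons p t =>
    rw [flat_cons]
    have h4 : 1 ≤ p.2 := h1 p (by simp)
    intro hc
    have := congrArg List.length hc
    simp at this
    omega

lemma keep_nil : keep [] = [] := rfl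

lemma keep_cons_big (v c : Int) (gs : List (Int × Int)) (h : 4 ≤ c) :
    keep ((v, c) :: gs) = keep gs := by
  simp [keep, List.filter_cons]; omega

lemma keep_cons_small (v c : Int) (gs : List (Int × Int)) (h : c < 4) :
    keep ((v, c) :: gs) = (v, c) :: keep gs := by
  simp [keep, List.filter_cons]; omega

lemma scoreOf_cons_big (v c : Int) (gs : List (Int × Int)) (h : 4 ≤ c) :
    scoreOf ((v, c) :: gs) = v * c + scoreOf gs := by
  simp [scoreOf, List.filter_cons, h]

lemma scoreOf_cons_small (v c : Int) (gs : List (Int × Int)) (h : c < 4) :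
    scoreOf ((v, c) :: gs) = scoreOf gs := by
  have hd : (decide (4 ≤ c)) = false := by simp; omega
  simp [scoreOf, List.filter_cons, hd]

lemma anyBig_cons (v c : Int) (gs : List (Int × Int)) :
    anyBig ((v, c) :: gs) = (decide (4 ≤ c) || anyBig gs) := by
  simp [anyBig]

-- ===== A side =====

lemma stepA_match (st : StA) (b : Int) (h : st.num = b) :
    stepA st b = { st with cnt := st.cnt + 1, nb := st.nb ++ [b] } := by
  simp [stepA, h]

lemma stepA_ne (st : StA) (b : Int) (h : st.num ≠ b) :
    stepA st b = if 4 ≤ st.cnt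
      then ⟨b, 1, (st.nb.take (st.nb.length - st.cnt.toNat)) ++ [b], st.sc + st.num * st.cnt, true⟩
      else { st with num := b, cnt := 1, nb := st.nb ++ [b] } := by
  have hb : (st.num == b) = false := by simp [h]
  simp only [stepA, hb, Bool.false_eq_true, if_false, ge_iff_le]

lemma foldA_replicate (k : Nat) : ∀ (st : StA) (v : Int), st.num = v →
    (List.replicate k v).foldl stepA st = { st with cnt := st.cnt + k, nb := st.nb ++ List.replicate k v } := by
  induction k with
  | zero => intro st v _; simp
  | succ n ih =>
    intro st v h
    rw [List.replicate_succ, List.foldl_cons, stepA_match st v h]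
    rw [ih _ v (by simp [h])]
    have hc : st.cnt + (((n + 1 : Nat)) : Int) = st.cnt + 1 + (n : Int) := by push_cast; ring
    have hn : st.nb ++ List.replicate (n + 1) v = (st.nb ++ [v]) ++ List.replicate n v := by
      simp [List.replicate_succ]
    simp only [hc, hn]
    simp [List.append_assoc]

-- the inner for-loop, group by group, from the state just after finishing a run (v, c)
lemma foldA_groups (gs : List (Int × Int)) : ∀ (v c : Int) (base : List Int) (sc : Int) (fl : Bool),
    1 ≤ c → chainD ((v, c) :: gs) → noM1 ((v, c) :: gs) → cnt1 gs →
    (flat gs ++ [-1]).foldl stepA ⟨v, c, base ++ List.replicate c.toNat v, sc, fl⟩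
      = ⟨-1, 1, base ++ flat (keep ((v, c) :: gs)) ++ [-1], sc + scoreOf ((v, c) :: gs),
          fl || anyBig ((v, c) :: gs)⟩ := by
  induction gs with
  | nil =>
    intro v c base sc fl h1 _hch hm1 _hc1
    have hv : v ≠ -1 := (hm1 (v, c) (by simp))
    rw [flat_nil, List.nil_append, List.foldl_cons, List.foldl_nil,
        stepA_ne _ _ (by simpa using hv)]
    by_cases hc : 4 ≤ c
    · rw [if_pos hc, keep_cons_big v c [] hc, scoreOf_cons_big v c [] hc, anyBig_cons]
      have htake : ((base ++ List.replicate c.toNat v).take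
          ((base ++ List.replicate c.toNat v).length - c.toNat)) = base := by
        rw [List.length_append, List.length_replicate, Nat.add_sub_cancel]
        exact List.take_left
      simp [htake, scoreOf, keep, hc, flat_nil]
    · rw [if_neg hc, keep_cons_small v c [] (by omega), scoreOf_cons_small v c [] (by omega),
          anyBig_cons]
      have hd : (decide (4 ≤ c)) = false := by simp; omega
      simp [flat_cons, scoreOf, anyBig, hd, keep_nil, flat_nil]
  | cons q gs ih =>
    intro v c base sc fl h1 hch hm1 hc1
    obtain ⟨w, d⟩ := q
    have hvw : v ≠ w := (List.isChain_cons_cons.mp hch).1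
    have hd1 : 1 ≤ d := hc1 (w, d) (by simp)
    have hrep : List.replicate d.toNat w = w :: List.replicate (d.toNat - 1) w := by
      have h9 : d.toNat = (d.toNat - 1) + 1 := by omega
      conv_lhs => rw [h9, List.replicate_succ]
    rw [flat_cons, hrep, List.append_assoc, List.cons_append, List.foldl_cons,
        List.foldl_append]
    rw [stepA_ne _ _ (by simpa using hvw)]
    -- state after flushing the finished run (v, c) and reading the first w
    by_cases hc : 4 ≤ c
    · rw [if_pos hc]
      dsimp only
      have htake : ((base ++ List.replicate c.toNat v).take
          ((base ++ List.replicate c.toNat v).length - c.toNat)) = base := by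
        rw [List.length_append, List.length_replicate, Nat.add_sub_cancel]
        exact List.take_left
      rw [htake]
      rw [foldA_replicate (d.toNat - 1) ⟨w, 1, base ++ [w], sc + v * c, true⟩ w rfl]
      dsimp only
      have hcnt : (1 : Int) + ((d.toNat - 1 : Nat) : Int) = d := by omega
      have hnb : (base ++ [w]) ++ List.replicate (d.toNat - 1) w = base ++ List.replicate d.toNat w := by
        rw [List.append_assoc, hrep]
        rfl
      rw [hcnt, hnb]
      rw [ih w d base (sc + v * c) true hd1 (List.isChain_cons_cons.mp hch).2
            (fun p hp => hm1 p (List.mem_cons_of_mem _ hp)) (fun p hp => hc1 p (List.mem_cons_of_mem _ hp))]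
      rw [keep_cons_big v c _ hc, scoreOf_cons_big v c _ hc, anyBig_cons]
      have : (decide (4 ≤ c)) = true := by simpa using hc
      simp [this, add_assoc, anyBig_cons]
    · rw [if_neg hc]
      dsimp only
      rw [foldA_replicate (d.toNat - 1) ⟨w, 1, (base ++ List.replicate c.toNat v) ++ [w], sc, fl⟩ w rfl]
      dsimp only
      have hcnt : (1 : Int) + ((d.toNat - 1 : Nat) : Int) = d := by omega
      have hnb : ((base ++ List.replicate c.toNat v) ++ [w]) ++ List.replicate (d.toNat - 1) w
          = (base ++ List.replicate c.toNat v) ++ List.replicate d.toNat w := by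
        rw [List.append_assoc (base ++ List.replicate c.toNat v), hrep]
        rfl
      rw [hcnt, hnb]
      rw [ih w d (base ++ List.replicate c.toNat v) sc fl hd1 (List.isChain_cons_cons.mp hch).2
            (fun p hp => hm1 p (List.mem_cons_of_mem _ hp)) (fun p hp => hc1 p (List.mem_cons_of_mem _ hp))]
      rw [keep_cons_small v c _ (by omega), scoreOf_cons_small v c _ (by omega), anyBig_cons]
      have : (decide (4 ≤ c)) = false := by simp; omega
      simp [this, flat_cons, anyBig_cons]

lemma passA_eq (gs : List (Int × Int)) (h : Int) (sc : Int)
    (h1 : cnt1 gs) (h2 : chainD gs) (h3 : noM1 gs) (h0 : gs ≠ []) :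
    passA (h :: flat gs) sc
      = ⟨-1, 1, (0 :: flat (keep gs)) ++ [-1], sc + scoreOf gs, anyBig gs⟩ := by
  obtain ⟨⟨v, c⟩, rest, rfl⟩ : ∃ p rest, gs = p :: rest := by
    cases gs with
    | nil => exact absurd rfl h0
    | cons p rest => exact ⟨p, rest, rfl⟩
  have hc1 : 1 ≤ c := h1 (v, c) (by simp)
  have hrep : List.replicate c.toNat v = v :: List.replicate (c.toNat - 1) v := by
    have h9 : c.toNat = (c.toNat - 1) + 1 := by omega
    conv_lhs => rw [h9, List.replicate_succ]
  have hflat : flat ((v, c) :: rest) = v :: (List.replicate (c.toNat - 1) v ++ flat rest) := by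
    rw [flat_cons, hrep]; rfl
  unfold passA
  rw [List.tail_cons]
  have hget : PySem.List.pyGetD (h :: flat ((v, c) :: rest)) 1 0 = v := by
    rw [hflat]
    rw [show ((1 : Int)) = ((1 : Nat) : Int) by rfl, PySem.List.pyGetD_natCast]
    rfl
  rw [hget, hflat]
  rw [List.cons_append, List.foldl_cons, List.append_assoc, List.foldl_append]
  rw [stepA_match _ v rfl]
  dsimp only
  rw [foldA_replicate (c.toNat - 1) ⟨v, 0 + 1, [0] ++ [v], sc, false⟩ v rfl]
  dsimp only
  have hcnt : (0 : Int) + 1 + ((c.toNat - 1 : Nat) : Int) = c := by omega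
  have hnb : ([(0 : Int)] ++ [v]) ++ List.replicate (c.toNat - 1) v = [0] ++ List.replicate c.toNat v := by
    rw [List.append_assoc, hrep]
    rfl
  rw [hcnt, hnb]
  rw [foldA_groups rest v c [0] sc false hc1 h2 h3 (fun p hp => h1 p (List.mem_cons_of_mem _ hp))]
  simp

-- ===== B side =====

lemma chainD_set_last (m : List (Int × Int)) (w d e : Int)
    (h : chainD (m ++ [(w, d)])) : chainD (m ++ [(w, e)]) := by
  unfold chainD at h ⊢
  rw [List.isChain_append] at h ⊢
  exact ⟨h.1, List.isChain_singleton _, by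
    intro x hx y hy
    simp at hy
    subst hy
    exact h.2.2 x hx (w, d) (by simp)⟩

lemma chainD_snoc (m : List (Int × Int)) (w d : Int) (q : Int × Int)
    (h : chainD (m ++ [(w, d)])) (hne : w ≠ q.1) : chainD ((m ++ [(w, d)]) ++ [q]) := by
  unfold chainD at h ⊢
  rw [List.isChain_append]
  refine ⟨h, List.isChain_singleton _, ?_⟩
  intro x hx y hy
  simp at hx hy
  subst hx; subst hy
  exact hne

lemma foldB (gs : List (Int × Int)) : ∀ (st : StB),
    cnt1 gs → noM1 gs → cnt1 st.m → noM1 st.m → chainD st.m →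
    (gs.foldl stepM st).sc = st.sc + scoreOf gs ∧
    (gs.foldl stepM st).ch = (st.ch || anyBig gs) ∧
    flat (gs.foldl stepM st).m = flat st.m ++ flat (keep gs) ∧
    cnt1 (gs.foldl stepM st).m ∧ noM1 (gs.foldl stepM st).m ∧ chainD (gs.foldl stepM st).m := by
  induction gs with
  | nil =>
    intro st _ _ hc hm hch
    refine ⟨by simp [scoreOf], by simp [anyBig], by simp [keep_nil, flat_nil], hc, hm, hch⟩
  | cons p t ih =>
    intro st hcg hmg hc hm hch
    have hp1 : 1 ≤ p.2 := hcg p (by simp)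
    have hpm : p.1 ≠ -1 := hmg p (by simp)
    have hcg' : cnt1 t := fun q hq => hcg q (List.mem_cons_of_mem _ hq)
    have hmg' : noM1 t := fun q hq => hmg q (List.mem_cons_of_mem _ hq)
    rw [List.foldl_cons]
    by_cases hbig : 4 ≤ p.2
    · have hstep : stepM st p = { st with sc := st.sc + p.1 * p.2, ch := true } := by
        unfold stepM; rw [if_pos hbig]
      rw [hstep]
      obtain ⟨r1, r2, r3, r4, r5, r6⟩ := ih { st with sc := st.sc + p.1 * p.2, ch := true } hcg' hmg' hc hm hch
      refine ⟨?_, ?_, ?_, r4, r5, r6⟩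
      · rw [r1]
        obtain ⟨v, c⟩ := p
        rw [scoreOf_cons_big v c t hbig]
        dsimp only
        ring
      · rw [r2]
        obtain ⟨v, c⟩ := p
        rw [anyBig_cons]
        simp [hbig]
      · rw [r3]
        obtain ⟨v, c⟩ := p
        rw [keep_cons_big v c t hbig]
    · have key : flat (stepM st p).m = flat st.m ++ List.replicate p.2.toNat p.1 ∧
          cnt1 (stepM st p).m ∧ noM1 (stepM st p).m ∧ chainD (stepM st p).m ∧
          (stepM st p).sc = st.sc ∧ (stepM st p).ch = st.ch := by
        unfold stepM
        rw [if_neg hbig]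
        rcases List.eq_nil_or_concat st.m with he | ⟨m', ⟨w, d⟩, he⟩ <;> rw [he]
        · simp only [List.getLast?_nil]
          refine ⟨by simp [he, flat_cons, flat_nil], ?_, ?_, ?_, ?_, ?_⟩
          · intro q hq; simp at hq; subst hq; omega
          · intro q hq; simp at hq; subst hq; exact hpm
          · exact List.isChain_singleton _
          · trivial
          · trivial
        · simp only [List.concat_eq_append] at he ⊢
          rw [he] at hc hm hch
          simp only [List.getLast?_concat]
          have hd1 : 1 ≤ d := hc (w, d) (by simp)
          have hwm : w ≠ -1 := hm (w, d) (by simp)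
          by_cases hwp : w = p.1
          · rw [if_pos (by simpa using hwp)]
            simp only [List.dropLast_concat]
            refine ⟨?_, ?_, ?_, ?_, ?_, ?_⟩
            · rw [flat_append, flat_append, flat_cons, flat_cons, flat_nil, List.append_assoc]
              have h9 : (d + p.2).toNat = d.toNat + p.2.toNat := by omega
              rw [h9, List.replicate_add, hwp]
              simp
            · intro q hq
              rcases List.mem_append.mp hq with h' | h'
              · exact hc q (List.mem_append.mpr (Or.inl h'))
              · simp at h'; subst h'; omega
            · intro q hq
              rcases List.mem_append.mp hq with h' | h'
              · exact hm q (List.mem_append.mpr (Or.inl h'))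
              · simp at h'; subst h'; exact hwm
            · exact chainD_set_last m' w d (d + p.2) hch
            · trivial
            · trivial
          · rw [if_neg (by simpa using hwp)]
            refine ⟨?_, ?_, ?_, ?_, ?_, ?_⟩
            · rw [flat_append, flat_cons, flat_nil]
              simp
            · intro q hq
              rcases List.mem_append.mp hq with h' | h'
              · exact hc q h'
              · simp at h'; subst h'; exact hp1
            · intro q hq
              rcases List.mem_append.mp hq with h' | h'
              · exact hm q h'
              · simp at h'; subst h'; exact hpm
            · exact chainD_snoc m' w d p hch hwp
            · trivial
            · trivial
      obtain ⟨k1, k2, k3, k4, k5, k6⟩ := key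
      obtain ⟨r1, r2, r3, r4, r5, r6⟩ := ih (stepM st p) hcg' hmg' k2 k3 k4
      obtain ⟨v, c⟩ := p
      refine ⟨?_, ?_, ?_, r4, r5, r6⟩
      · rw [r1, k5, scoreOf_cons_small v c t (by omega)]
      · rw [r2, k6, anyBig_cons]
        have : (decide (4 ≤ c)) = false := by simp at hbig ⊢; omega
        rw [this, Bool.false_or]
      · rw [r3, k1, keep_cons_small v c t (by omega), flat_cons, List.append_assoc]

-- ===== run-length encoding =====

lemma foldR (xs : List Int) : ∀ (g : List (Int × Int)),
    (-1 : Int) ∉ xs → cnt1 g → noM1 g → chainD g →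
    flat (xs.foldl stepR g) = flat g ++ xs ∧
    cnt1 (xs.foldl stepR g) ∧ noM1 (xs.foldl stepR g) ∧ chainD (xs.foldl stepR g) := by
  induction xs with
  | nil =>
    intro g _ hc hm hch
    exact ⟨by simp, hc, hm, hch⟩
  | cons b t ih =>
    intro g hnm hc hm hch
    have hb : b ≠ -1 := fun hb => hnm (hb ▸ List.mem_cons_self)
    have ht : (-1 : Int) ∉ t := fun hm' => hnm (List.mem_cons_of_mem _ hm')
    rw [List.foldl_cons]
    have key : flat (stepR g b) = flat g ++ [b] ∧ cnt1 (stepR g b) ∧ noM1 (stepR g b) ∧ chainD (stepR g b) := by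
      unfold stepR
      rcases List.eq_nil_or_concat g with rfl | ⟨m', ⟨v, c⟩, rfl⟩
      · refine ⟨by simp [flat_cons, flat_nil], ?_, ?_, ?_⟩
        · intro p hp; simp at hp; subst hp; simp
        · intro p hp; simp at hp; subst hp; exact hb
        · exact List.isChain_singleton _
      · simp only [List.concat_eq_append] at hc hm hch ⊢
        simp only [List.getLast?_concat]
        have hc1 : 1 ≤ c := hc (v, c) (by simp)
        by_cases hvb : v = b
        · rw [if_pos (by simpa using hvb)]
          simp only [List.dropLast_concat]
          refine ⟨?_, ?_, ?_, ?_⟩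
          · rw [flat_append, flat_append, flat_cons, flat_cons, flat_nil, List.append_assoc]
            have : (c + 1).toNat = c.toNat + 1 := by omega
            rw [this, List.replicate_succ' , hvb]
            simp
          · intro p hp
            rcases List.mem_append.mp hp with h' | h'
            · exact hc p (List.mem_append.mpr (Or.inl h'))
            · simp at h'; subst h'; omega
          · intro p hp
            rcases List.mem_append.mp hp with h' | h'
            · exact hm p (List.mem_append.mpr (Or.inl h'))
            · simp at h'; subst h'; exact hm (v, c) (by simp)
          · exact chainD_set_last m' v c (c + 1) hch
        · rw [if_neg (by simpa using hvb)]
          refine ⟨?_, ?_, ?_, ?_⟩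
          · rw [flat_append, flat_cons, flat_nil]
            simp
          · intro p hp
            rcases List.mem_append.mp hp with h' | h'
            · exact hc p h'
            · simp at h'; subst h'; simp
          · intro p hp
            rcases List.mem_append.mp hp with h' | h'
            · exact hm p h'
            · simp at h'; subst h'; exact hb
          · exact chainD_snoc m' v c (b, 1) hch hvb
      
    obtain ⟨k1, k2, k3, k4⟩ := key
    obtain ⟨r1, r2, r3, r4⟩ := ih (stepR g b) ht k2 k3 k4
    exact ⟨by rw [r1, k1, List.append_assoc]; rfl, r2, r3, r4⟩

-- ===== the two cascade loops agree =====

lemma mB_pos (gs : List (Int × Int)) (hc : cnt1 gs) (h0 : gs ≠ []) : 1 ≤ mB gs := by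
  cases gs with
  | nil => exact absurd rfl h0
  | cons p t =>
    have := hc p (by simp)
    simp [mB]
    omega

lemma loop_eq (n : Nat) : ∀ (gs : List (Int × Int)) (h sc : Int), mB gs ≤ n →
    cnt1 gs → noM1 gs → chainD gs → gs ≠ [] →
    loopA (h :: flat gs) sc = ((0 : Int) :: flat (loopB gs sc).1, (loopB gs sc).2) := by
  induction n with
  | zero =>
    intro gs h sc hn hc hm hch h0
    exact absurd hn (by have := mB_pos gs hc h0; omega)
  | succ n ih =>
    intro gs h sc hn hc hm hch h0
    have hfl : flat gs ≠ [] := flat_ne_nil gs hc h0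
    have hlen : 2 ≤ (h :: flat gs).length := by
      cases hq : flat gs with
      | nil => exact absurd hq hfl
      | cons a l => simp [hq]
    obtain ⟨r1, r2, r3, r4, r5, r6⟩ := foldB gs ⟨[], sc, false⟩ hc hm
      (by intro p hp; simp at hp) (by intro p hp; simp at hp) (List.isChain_nil)
    have hpassB : (passB gs sc) = gs.foldl stepM ⟨[], sc, false⟩ := rfl
    rw [loopA, dif_pos hlen]
    dsimp only
    rw [passA_eq gs h sc hc hch hm h0]
    dsimp only
    rw [List.dropLast_concat]
    rw [loopB]
    by_cases hbig : anyBig gs = true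
    · have hch' : (passB gs sc).ch = true := by rw [hpassB, r2]; simp [hbig]
      rw [dif_pos hbig, dif_pos hch']
      have hsc : (passB gs sc).sc = sc + scoreOf gs := by rw [hpassB, r1]
      have hflm : flat (passB gs sc).m = flat (keep gs) := by
        rw [hpassB, r3]
        have : flat (⟨[], sc, false⟩ : StB).m = [] := rfl
        rw [this, List.nil_append]
      by_cases hmg : (passB gs sc).m = []
      · rw [hmg] at hflm
        rw [← hflm, hsc]
        rw [loopA]
        rw [dif_neg (by simp [flat_nil])]
        rw [hmg, loopB]
        have hp0 : (passB [] (sc + scoreOf gs)).ch = false := rfl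
        rw [dif_neg (by rw [hp0]; simp)]
        have hm0 : (passB [] (sc + scoreOf gs)).m = [] := rfl
        have hs0 : (passB [] (sc + scoreOf gs)).sc = sc + scoreOf gs := rfl
        rw [hm0, hs0]
      · have hdec : mB (passB gs sc).m ≤ n := by
          have := passB_ch_dec gs sc hch'
          omega
        have := ih (passB gs sc).m 0 ((passB gs sc).sc) hdec
          (by rw [hpassB]; exact r4) (by rw [hpassB]; exact r5) (by rw [hpassB]; exact r6) hmg
        rw [← hflm, hsc] at *
        exact this
    · have hbf : anyBig gs = false := by simpa using hbig
      have hch' : (passB gs sc).ch = false := by rw [hpassB, r2]; simp [hbf]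
      rw [dif_neg (by simp [hbf]), dif_neg (by simp [hch'])]
      have hsc : (passB gs sc).sc = sc + scoreOf gs := by rw [hpassB, r1]
      have hflm : flat (passB gs sc).m = flat (keep gs) := by
        rw [hpassB, r3]
        have : flat (⟨[], sc, false⟩ : StB).m = [] := rfl
        rw [this, List.nil_append]
      rw [hsc, hflm]

lemma out_fold (gs : List (Int × Int)) : ∀ (a : List Int),
    gs.foldl (fun out p => out ++ List.replicate p.2.toNat p.1) a = a ++ flat gs := by
  induction gs with
  | nil => intro a; simp [flat_nil]
  | cons p t ih =>
    intro a
    rw [List.foldl_cons, ih, flat_cons, List.append_assoc]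

-- ===== VERDICT (by name: the statement is the Claim_ definition above) =====
theorem explode_bead_spec : Claim_equal_explode_bead := by
  intro bead_stack _hdom hpre
  unfold Spec_explode_bead
  cases bead_stack with
  | nil =>
    unfold explode_bead explode_bead_alt
    rw [if_neg (by simp)]
    rw [loopA, dif_neg (by simp)]
  | cons hd t =>
    cases t with
    | nil =>
      unfold explode_bead explode_bead_alt
      rw [if_pos (by simp)]
      dsimp only
      have h0 : ([] : List Int).foldl stepR [] = [] := rfl
      rw [h0, loopB]
      have hp0 : (passB [] 0).ch = false := rfl
      rw [dif_neg (by rw [hp0]; simp)]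
      have hm0 : (passB [] 0).m = [] := rfl
      have hs0 : (passB [] 0).sc = 0 := rfl
      rw [hm0, hs0]
      rfl
    | cons b t' =>
      have hpre' : (-1 : Int) ∉ (b :: t') := by simpa [Pre_explode_bead] using hpre
      obtain ⟨k1, k2, k3, k4⟩ := foldR (b :: t') [] hpre'
        (by intro p hp; simp at hp) (by intro p hp; simp at hp) (List.isChain_nil)
      rw [flat_nil, List.nil_append] at k1
      have hg0 : (b :: t').foldl stepR [] ≠ [] := by
        intro hh
        rw [hh, flat_nil] at k1
        exact (List.cons_ne_nil b t') k1.symm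
      unfold explode_bead explode_bead_alt
      rw [if_neg (by simp)]
      dsimp only
      rw [out_fold]
      have harg : (hd : Int) :: b :: t' = hd :: flat ((b :: t').foldl stepR []) := by rw [k1]
      rw [harg, loop_eq (mB ((b :: t').foldl stepR [])) _ hd 0 le_rfl k2 k3 k4 hg0]
      rfl
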